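-- pv_equiv track=rewrite | github.com/jahess150/ProjectEulerSolutions | Problem8.py | greatest_product_adjacent
-- ===== SOURCE A (Python) =====
-- def greatest_product_adjacent(series, length):
--     # Set initial values for iterating
--     max_product = 0
--     current_product = 1
--     zero_count = 0
--
--     # For all digits in the string
--     for i in range(len(series)):
--         digit = int(series[i])  # Get current digit
--
--         # Multiply the new digit
--         if digit == 0:
--             zero_count += 1  # If zero is within length digits, product is zero
--         else:
--             current_product *= digit
--
--         # Remove the digit that falls out of the length-digit window
--         if i >= length:  # Only apply window logic once we reach the 'length' variable
--             exiting_digit = int(series[i - length])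
--             if exiting_digit == 0:
--                 zero_count -= 1  # Lower amount of zeroes in length-digit window by 1
--             else:
--                 current_product //= exiting_digit  # Divide the last digit from the product "removing" it
--
--         # Update max_product ONLY if there are no zeroes in the length-digit window
--         if i >= length - 1 and zero_count == 0:
--             max_product = max(max_product, current_product)
--
--     # Return max product
--     return max_product
-- ===== SOURCE B (Python) =====
-- def greatest_product_adjacent(series, length):
--     digits = [int(c) for c in series]
--     max_product = 0
--     for i in range(len(digits) - length + 1):
--         product = 1
--         for d in digits[i:i + length]:
--             product *= d
--         if product > max_product:
--             max_product = product
--     return max_product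
-- ===== Notes on version B (the rewrite author's own statement) =====
-- stated objective: simpler
-- what changed: Replaced A's incremental sliding-window state machine (running product, zero counter, exact division on window exit) by a direct scan that recomputes each length-digit window product and keeps the running maximum; zero-containing windows contribute 0 instead of being skipped, which preserves the maximum since digits are nonnegative.
-- outside the precondition, e.g. on greatest_product_adjacent('', 0): A returns 0, B returns 1; on greatest_product_adjacent('12', 0): A returns 1, B returns 1
import Mathlib
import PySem

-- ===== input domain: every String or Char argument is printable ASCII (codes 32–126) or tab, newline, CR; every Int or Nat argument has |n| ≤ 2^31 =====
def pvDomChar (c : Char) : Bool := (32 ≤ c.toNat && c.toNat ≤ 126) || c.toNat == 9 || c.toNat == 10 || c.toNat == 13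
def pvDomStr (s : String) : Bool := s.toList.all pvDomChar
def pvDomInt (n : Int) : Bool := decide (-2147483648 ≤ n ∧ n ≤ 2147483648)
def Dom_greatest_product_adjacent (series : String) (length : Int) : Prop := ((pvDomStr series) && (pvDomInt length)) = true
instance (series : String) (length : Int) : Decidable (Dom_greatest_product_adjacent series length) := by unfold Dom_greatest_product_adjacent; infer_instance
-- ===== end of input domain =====

-- B replaces A's incremental sliding-window state machine by a direct per-window product scan; objective: simpler (not faster).

-- ===== PORT A =====
-- int(series[i]) on a single character (exact where Python returns; Python raises ValueError
-- on non-digit characters, which Pre_ excludes)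
def pyDigit (c : Char) : Int := (PySem.Int.ofChars? [c]).getD 0

-- one iteration of A's for-loop; state = (max_product, current_product, zero_count)
def stepA (cs : List Char) (length : Int) (st : Int × Int × Int) (i : Nat) : Int × Int × Int :=
  let mp := st.1
  let cp := st.2.1
  let zc := st.2.2
  let digit := pyDigit (PySem.List.pyGetD cs (i : Int) ' ')
  let s1 : Int × Int := if digit = 0 then (cp, zc + 1) else (cp * digit, zc)
  let s2 : Int × Int :=
    if length ≤ (i : Int) then
      let exiting := pyDigit (PySem.List.pyGetD cs ((i : Int) - length) ' ')
      if exiting = 0 then (s1.1, s1.2 - 1)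
      else (PySem.Int.floordiv s1.1 exiting, s1.2)
    else s1
  let mp' := if length - 1 ≤ (i : Int) ∧ s2.2 = 0 then max mp s2.1 else mp
  (mp', s2.1, s2.2)

def greatest_product_adjacent (series : String) (length : Int) : Int :=
  ((List.range series.toList.length).foldl (stepA series.toList length) (0, 1, 0)).1

-- ===== PORT B =====
def greatest_product_adjacent_alt (series : String) (length : Int) : Int :=
  (PySem.List.pyRange 0 (((series.toList.map pyDigit).length : Int) - length + 1) 1).foldl
    (fun mp i =>
      let product := (PySem.List.slice (series.toList.map pyDigit) (some i) (some (i + length))).foldl (fun p d => p * d) 1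
      if mp < product then product else mp) 0

-- ===== PRECONDITION & SPEC =====
-- Pre_ excludes non-digit characters (Python's int() raises ValueError there) and length ≤ 0,
-- which is outside the natural domain of a window length: a negative length raises IndexError
-- on every nonempty series, and length = 0 yields an accidental value from leftover loop state.
def Pre_greatest_product_adjacent (series : String) (length : Int) : Prop :=
  1 ≤ length ∧ series.toList.all (fun c => c.isDigit) = true
instance (series : String) (length : Int) : Decidable (Pre_greatest_product_adjacent series length) := by
  unfold Pre_greatest_product_adjacent; infer_instance

def pvWitness_greatest_product_adjacent : String × Int := ("2316408", 3)

def Spec_greatest_product_adjacent (series : String) (length : Int) (out : Int) : Prop := out = greatest_product_adjacent_alt series length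
instance (series : String) (length : Int) (out : Int) : Decidable (Spec_greatest_product_adjacent series length out) := by unfold Spec_greatest_product_adjacent; infer_instance

-- ===== CLAIM (what is proved, stated in full; the proofs are below) =====
def Claim_equal_greatest_product_adjacent : Prop := ∀ (series : String) (length : Int), Dom_greatest_product_adjacent series length → Pre_greatest_product_adjacent series length → Spec_greatest_product_adjacent series length (greatest_product_adjacent series length)

-- ===== LEMMAS AND PROOFS =====

-- window of at most L digits ending just before position k (A's implicit window after step k-1)
def winA (ds : List Int) (L k : Nat) : List Int := (ds.take k).drop (k - L)
-- product of the nonzero elements (A's current_product)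
def prodNZ (l : List Int) : Int := (l.filter (fun d => d ≠ 0)).prod
-- number of zeros (A's zero_count)
def zcnt (l : List Int) : Int := ((l.filter (fun d => d = 0)).length : Int)
-- product of the full window starting at j (B's per-window product)
def winP (ds : List Int) (L j : Nat) : Int := ((ds.drop j).take L).prod
-- running maximum over all full windows finished after k steps (A's max_product)
def bmax (ds : List Int) (L k : Nat) : Int :=
  (List.range (k + 1 - L)).foldl (fun m j => max m (winP ds L j)) 0

theorem bmax_nonneg (ds : List Int) (L k : Nat) : 0 ≤ bmax ds L k :=
  (PySem.List.le_foldl_max_int (List.range (k + 1 - L)) (fun j => winP ds L j) 0).1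

theorem bmax_succ_ge (ds : List Int) (L k : Nat) (h : L ≤ k + 1) :
    bmax ds L (k + 1) = max (bmax ds L k) (winP ds L (k + 1 - L)) := by
  have : k + 1 + 1 - L = (k + 1 - L) + 1 := by omega
  simp [bmax, this, List.range_succ]

theorem bmax_succ_lt (ds : List Int) (L k : Nat) (h : k + 1 < L) :
    bmax ds L (k + 1) = bmax ds L k := by
  have h1 : k + 1 + 1 - L = 0 := by omega
  have h2 : k + 1 - L = 0 := by omega
  simp [bmax, h1, h2]

theorem prodNZ_append (l : List Int) (d : Int) :
    prodNZ (l ++ [d]) = if d = 0 then prodNZ l else prodNZ l * d := by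
  by_cases hd : d = 0 <;> simp [prodNZ, List.filter_append, hd]

theorem zcnt_append (l : List Int) (d : Int) :
    zcnt (l ++ [d]) = if d = 0 then zcnt l + 1 else zcnt l := by
  by_cases hd : d = 0 <;> simp [zcnt, List.filter_append, hd]

theorem prodNZ_cons (d : Int) (l : List Int) :
    prodNZ (d :: l) = if d = 0 then prodNZ l else d * prodNZ l := by
  by_cases hd : d = 0 <;> simp [prodNZ, hd]

theorem zcnt_cons (d : Int) (l : List Int) :
    zcnt (d :: l) = if d = 0 then zcnt l + 1 else zcnt l := by
  by_cases hd : d = 0 <;> simp [zcnt, hd, Int.add_comm]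

theorem floordiv_mul_cancel (e p : Int) (he : e ≠ 0) :
    PySem.Int.floordiv (e * p) e = p := by
  have hdvd : e ∣ e * p := dvd_mul_right e p
  have hm : PySem.Int.mod (e * p) e = 0 := (PySem.Int.mod_eq_zero_iff_dvd (e * p) e).2 hdvd
  have h := PySem.Int.floordiv_mul_add_mod (e * p) e
  rw [hm, add_zero] at h
  have : PySem.Int.floordiv (e * p) e * e = p * e := by linarith [h, mul_comm e p]
  exact mul_right_cancel₀ he this

theorem zcnt_eq_zero_iff (l : List Int) : zcnt l = 0 ↔ ∀ x ∈ l, x ≠ 0 := by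
  simp [zcnt, List.length_eq_zero_iff, List.filter_eq_nil_iff]

theorem prodNZ_of_no_zero (l : List Int) (h : ∀ x ∈ l, x ≠ 0) : prodNZ l = l.prod := by
  rw [prodNZ, List.filter_eq_self.2 (by simpa using h)]

theorem prod_of_has_zero (l : List Int) (h : ¬ ∀ x ∈ l, x ≠ 0) : l.prod = 0 := by
  push Not at h
  obtain ⟨x, hx, hx0⟩ := h
  subst hx0
  exact List.prod_eq_zero hx

theorem winA_eq_winP_list (ds : List Int) (L k : Nat) (h : L ≤ k) :
    winA ds L k = (ds.drop (k - L)).take L := by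
  rw [winA, List.drop_take]
  congr 1
  omega

theorem winA_succ_lt (ds : List Int) (L k : Nat) (hk : k < ds.length) (hkL : k < L) :
    winA ds L (k + 1) = winA ds L k ++ [ds.getD k 0] := by
  have h1 : k + 1 - L = 0 := by omega
  have h2 : k - L = 0 := by omega
  rw [List.getD_eq_getElem _ _ hk, winA, winA, h1, h2, List.drop_zero, List.drop_zero,
    List.take_succ_eq_append_getElem hk]

theorem winA_shift (ds : List Int) (L k : Nat) (hk : k < ds.length) (hL : 1 ≤ L) (hkL : L ≤ k) :
    winA ds L k ++ [ds.getD k 0] = ds.getD (k - L) 0 :: winA ds L (k + 1) := by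
  rw [List.getD_eq_getElem _ _ hk, List.getD_eq_getElem _ _ (show k - L < ds.length by omega)]
  have htake : ds.take (k + 1) = ds.take k ++ [ds[k]] := List.take_succ_eq_append_getElem hk
  have hidx : k - L < (ds.take (k + 1)).length := by simp; omega
  have hdrop := List.drop_eq_getElem_cons hidx
  have hget : (ds.take (k + 1))[k - L] = ds[k - L] := by rw [List.getElem_take]
  have hsucc : k - L + 1 = k + 1 - L := by omega
  calc winA ds L k ++ [ds[k]]
      = (ds.take (k + 1)).drop (k - L) := by
        rw [htake, winA, List.drop_append_of_le_length (by simp; omega)]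
    _ = ds[k - L] :: winA ds L (k + 1) := by
        rw [hdrop, hget, winA, hsucc]

theorem pyDigit_at (cs : List Char) (k : Nat) (hk : k < cs.length) :
    pyDigit (PySem.List.pyGetD cs (k : Int) ' ') = (cs.map pyDigit).getD k 0 := by
  rw [PySem.List.pyGetD_natCast, List.getD_eq_getElem _ _ hk,
    List.getD_eq_getElem _ _ (show k < (cs.map pyDigit).length by simpa using hk),
    List.getElem_map]

-- A's max_product update step matches the running maximum over finished windows
theorem mp_update (ds : List Int) (L k : Nat) :
    (if ((L : Int) - 1 ≤ (k : Int)) ∧ zcnt (winA ds L (k + 1)) = 0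
       then max (bmax ds L k) (prodNZ (winA ds L (k + 1))) else bmax ds L k)
      = bmax ds L (k + 1) := by
  by_cases hLk : L ≤ k + 1
  · have hc1 : (L : Int) - 1 ≤ (k : Int) := by omega
    have hW : winA ds L (k + 1) = (ds.drop (k + 1 - L)).take L := winA_eq_winP_list ds L (k + 1) hLk
    rw [bmax_succ_ge ds L k hLk]
    by_cases hz : zcnt (winA ds L (k + 1)) = 0
    · rw [if_pos ⟨hc1, hz⟩, prodNZ_of_no_zero _ ((zcnt_eq_zero_iff _).1 hz), hW, winP]
    · rw [if_neg (by tauto)]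
      have h0 : winP ds L (k + 1 - L) = 0 := by
        rw [winP, ← hW]
        exact prod_of_has_zero _ (fun hall => hz ((zcnt_eq_zero_iff _).2 hall))
      rw [h0, max_eq_left (bmax_nonneg ds L k)]
  · have hc1 : ¬ ((L : Int) - 1 ≤ (k : Int)) := by omega
    rw [if_neg (by tauto), bmax_succ_lt ds L k (by omega)]

-- one iteration of A's loop, expressed on the window abstraction
theorem stepA_char (cs : List Char) (L : Nat) (hL : 1 ≤ L) (k : Nat) (hk : k < cs.length) (mp : Int) :
    stepA cs (L : Int) (mp, prodNZ (winA (cs.map pyDigit) L k), zcnt (winA (cs.map pyDigit) L k)) k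
      = (if ((L : Int) - 1 ≤ (k : Int)) ∧ zcnt (winA (cs.map pyDigit) L (k + 1)) = 0
           then max mp (prodNZ (winA (cs.map pyDigit) L (k + 1))) else mp,
         prodNZ (winA (cs.map pyDigit) L (k + 1)), zcnt (winA (cs.map pyDigit) L (k + 1))) := by
  have hkds : k < (cs.map pyDigit).length := by simpa using hk
  simp only [stepA, pyDigit_at cs k hk]
  by_cases hcase : L ≤ k
  · have hle : (L : Int) ≤ (k : Int) := by omega
    have hcast : (k : Int) - (L : Int) = ((k - L : Nat) : Int) := by omega
    rw [if_pos hle, hcast, pyDigit_at cs (k - L) (by omega)]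
    have hshift := winA_shift (cs.map pyDigit) L k hkds hL hcase
    have hP := congrArg prodNZ hshift
    have hZ := congrArg zcnt hshift
    rw [prodNZ_append, prodNZ_cons] at hP
    rw [zcnt_append, zcnt_cons] at hZ
    by_cases hd : (cs.map pyDigit).getD k 0 = 0
    · by_cases he : (cs.map pyDigit).getD (k - L) 0 = 0
      · simp only [if_pos hd, if_pos he] at hP hZ
        have hZ' : zcnt (winA (cs.map pyDigit) L k) = zcnt (winA (cs.map pyDigit) L (k + 1)) := by
          omega
        simp only [hd, he, reduceIte, hP, hZ', add_sub_cancel_right]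
      · simp only [if_pos hd, if_neg he] at hP hZ
        simp only [hd, he, reduceIte, hP, floordiv_mul_cancel _ _ he, hZ]
    · by_cases he : (cs.map pyDigit).getD (k - L) 0 = 0
      · simp only [if_neg hd, if_pos he] at hP hZ
        have hZ' : zcnt (winA (cs.map pyDigit) L k) - 1 = zcnt (winA (cs.map pyDigit) L (k + 1)) := by
          omega
        simp only [hd, he, reduceIte, hP, hZ']
      · simp only [if_neg hd, if_neg he] at hP hZ
        simp only [hd, he, reduceIte, hP, floordiv_mul_cancel _ _ he, hZ]
  · have hkL : k < L := by omega
    have hnle : ¬ ((L : Int) ≤ (k : Int)) := by omega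
    have hwin := winA_succ_lt (cs.map pyDigit) L k hkds hkL
    rw [if_neg hnle]
    by_cases hd : (cs.map pyDigit).getD k 0 = 0 <;>
      simp only [hwin, prodNZ_append, zcnt_append, hd, reduceIte]

-- the loop invariant of A: after k iterations the state is
-- (max over finished windows, product of nonzero digits of the current window, zeros in it)
theorem A_inv (cs : List Char) (L : Nat) (hL : 1 ≤ L) (k : Nat) (hk : k ≤ cs.length) :
    (List.range k).foldl (stepA cs (L : Int)) (0, 1, 0) =
      (bmax (cs.map pyDigit) L k,
       prodNZ (winA (cs.map pyDigit) L k),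
       zcnt (winA (cs.map pyDigit) L k)) := by
  induction k with
  | zero => simp [bmax, winA, prodNZ, zcnt, Nat.sub_eq_zero_of_le hL]
  | succ k ih =>
    have hk' : k < cs.length := by omega
    rw [List.range_succ, List.foldl_append, ih (by omega), List.foldl_cons, List.foldl_nil,
      stepA_char cs L hL k hk', mp_update (cs.map pyDigit) L k]

theorem B_eq (series : String) (L : Nat) :
    greatest_product_adjacent_alt series (L : Int) =
      bmax (series.toList.map pyDigit) L (series.toList.map pyDigit).length := by
  unfold greatest_product_adjacent_alt bmax
  rw [PySem.List.pyRange_one]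
  have hc : ((((series.toList.map pyDigit).length : Int)) - (L : Int) + 1 - 0).toNat
      = (series.toList.map pyDigit).length + 1 - L := by omega
  rw [hc, List.foldl_map]
  congr 1
  funext mp j
  have hs : PySem.List.slice (series.toList.map pyDigit) (some ((j : Nat) : Int))
      (some (((j : Nat) : Int) + ((L : Nat) : Int))) = ((series.toList.map pyDigit).drop j).take L :=
    PySem.List.slice_natCast_add (series.toList.map pyDigit) j L
  simp only [zero_add, hs, winP, ← List.prod_eq_foldl]
  exact (max_def_lt mp _).symm

-- ===== VERDICT (by name: the statement is the Claim_ definition above) =====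
theorem greatest_product_adjacent_spec : Claim_equal_greatest_product_adjacent := by
  intro series length _ hpre
  obtain ⟨h1, _⟩ := hpre
  obtain ⟨L, rfl⟩ : ∃ L : Nat, length = (L : Int) := ⟨length.toNat, by omega⟩
  have hL : 1 ≤ L := by exact_mod_cast h1
  unfold Spec_greatest_product_adjacent greatest_product_adjacent
  rw [B_eq series L, A_inv series.toList L hL series.toList.length le_rfl]
  simp
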